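-- pv_equiv track=rewrite | github.com/rooklift/advent_2024 | 22_part_02.py | diffs_are_possible
-- ===== SOURCE A (Python) =====
-- def diffs_are_possible(diffs):
-- 	# Top is the highest possible value of the principal thing, bottom the lowest
-- 	top = 9
-- 	bottom = 0
-- 	for diff in diffs:
-- 		top += diff
-- 		bottom += diff
-- 		top = min(9, top)
-- 		bottom = max(bottom, 0)
-- 		if bottom >= 10 or top < 0:
-- 			return False
-- 	return True
-- ===== SOURCE B (Python) =====
-- def diffs_are_possible(diffs):
-- 	# Global reformulation: the diffs are possible iff the spread of the
-- 	# running prefix sums (including the empty prefix 0) never reaches 10.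
-- 	p = lo = hi = 0
-- 	for d in diffs:
-- 		p += d
-- 		if p < lo:
-- 			lo = p
-- 		elif p > hi:
-- 			hi = p
-- 	return hi - lo <= 9
-- ===== Notes on version B (the rewrite author's own statement) =====
-- stated objective: simpler
-- what changed: Replaces A's incremental [bottom,top] interval-clamping with early exit by a single prefix-sum pass tracking the running min/max of all prefix sums and asking one global question: the spread of prefix sums stays below 10.
import Mathlib
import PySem

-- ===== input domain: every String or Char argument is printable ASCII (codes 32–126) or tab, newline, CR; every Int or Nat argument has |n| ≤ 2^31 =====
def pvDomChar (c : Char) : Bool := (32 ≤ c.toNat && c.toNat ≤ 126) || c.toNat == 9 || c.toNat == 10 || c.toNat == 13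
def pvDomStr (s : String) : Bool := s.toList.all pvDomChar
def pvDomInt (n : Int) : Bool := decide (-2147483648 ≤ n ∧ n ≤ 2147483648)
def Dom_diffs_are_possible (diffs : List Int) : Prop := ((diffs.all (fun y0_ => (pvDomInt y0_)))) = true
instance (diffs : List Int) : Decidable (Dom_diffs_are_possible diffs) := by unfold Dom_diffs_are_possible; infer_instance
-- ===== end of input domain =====

-- B replaces A's interval-clamping loop with a prefix-sum min/max spread test (simpler global reformulation; same O(n) cost).


-- ===== PORT A =====
def aLoop (diffs : List Int) (top bottom : Int) : Bool :=
  match diffs with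
  | [] => true
  | d :: rest =>
    let top := top + d
    let bottom := bottom + d
    let top := min 9 top
    let bottom := max bottom 0
    if bottom ≥ 10 || top < 0 then false else aLoop rest top bottom

def diffs_are_possible (diffs : List Int) : Bool := aLoop diffs 9 0

-- ===== PORT B =====
-- state (p, lo, hi): running prefix sum and its running min/max
def bStep (s : Int × Int × Int) (d : Int) : Int × Int × Int :=
  let p := s.1 + d
  if p < s.2.1 then (p, p, s.2.2)
  else if p > s.2.2 then (p, s.2.1, p)
  else (p, s.2.1, s.2.2)

def diffs_are_possible_alt (diffs : List Int) : Bool :=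
  let s := diffs.foldl bStep (0, 0, 0)
  decide (s.2.2 - s.2.1 ≤ 9)

-- ===== PRECONDITION & SPEC =====
def Spec_diffs_are_possible (diffs : List Int) (out : Bool) : Prop := out = diffs_are_possible_alt diffs
instance (diffs : List Int) (out : Bool) : Decidable (Spec_diffs_are_possible diffs out) := by unfold Spec_diffs_are_possible; infer_instance

-- ===== CLAIM (what is proved, stated in full; the proofs are below) =====
def Claim_equal_diffs_are_possible : Prop := ∀ (diffs : List Int), Dom_diffs_are_possible diffs → Spec_diffs_are_possible diffs (diffs_are_possible diffs)

-- ===== LEMMAS AND PROOFS =====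

-- the spread of prefix sums only grows along the fold
theorem bStep_mono (l : List Int) (p lo hi : Int) :
    (l.foldl bStep (p, lo, hi)).2.1 ≤ lo ∧ hi ≤ (l.foldl bStep (p, lo, hi)).2.2 := by
  induction l generalizing p lo hi with
  | nil => exact ⟨le_refl _, le_refl _⟩
  | cons d rest ih =>
    simp only [List.foldl, bStep]
    split_ifs with h1 h2
    · exact ⟨le_trans (ih _ _ _).1 (by omega), (ih _ _ _).2⟩
    · exact ⟨(ih _ _ _).1, le_trans (by omega) (ih _ _ _).2⟩
    · exact ih _ _ _

-- relating A's clamped interval state (top = 9 + p - hi, bottom = p - lo) to B's prefix extrema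
theorem main_lemma (l : List Int) (p lo hi : Int)
    (h1 : lo ≤ p) (h2 : p ≤ hi) (h3 : hi - lo ≤ 9) :
    aLoop l (9 + p - hi) (p - lo)
      = decide ((l.foldl bStep (p, lo, hi)).2.2 - (l.foldl bStep (p, lo, hi)).2.1 ≤ 9) := by
  induction l generalizing p lo hi with
  | nil => simp only [aLoop, List.foldl]; exact (decide_eq_true h3).symm
  | cons d rest ih =>
    simp only [aLoop, List.foldl, bStep]
    set p' := p + d with hp'
    have hps : p + d = p' := rfl
    by_cases hc : max (p - lo + d) 0 ≥ 10 ∨ min 9 (9 + p - hi + d) < 0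
    · -- A returns False at this step; spread already ≥ 10 and only grows
      rw [if_pos (by simpa [decide_eq_true_eq, Bool.or_eq_true] using hc)]
      split_ifs with g1 g2
      · have m := bStep_mono rest p' p' hi
        have : ¬ ((rest.foldl bStep (p', p', hi)).2.2 - (rest.foldl bStep (p', p', hi)).2.1 ≤ 9) := by
          rcases hc with hc | hc <;> omega
        simp [this]
      · have m := bStep_mono rest p' lo p'
        have : ¬ ((rest.foldl bStep (p', lo, p')).2.2 - (rest.foldl bStep (p', lo, p')).2.1 ≤ 9) := by
          rcases hc with hc | hc <;> omega
        simp [this]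
      · have m := bStep_mono rest p' lo hi
        have : ¬ ((rest.foldl bStep (p', lo, hi)).2.2 - (rest.foldl bStep (p', lo, hi)).2.1 ≤ 9) := by
          rcases hc with hc | hc <;> omega
        simp [this]
    · rw [if_neg (by simpa [decide_eq_true_eq, Bool.or_eq_true] using hc)]
      rw [not_or] at hc
      obtain ⟨hc1, hc2⟩ := hc
      split_ifs with g1 g2
      · have e1 : min 9 (9 + p - hi + d) = 9 + p' - hi := by omega
        have e2 : max (p - lo + d) 0 = p' - p' := by omega
        rw [e1, e2]
        exact ih p' p' hi (le_refl _) (by omega) (by omega)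
      · have e1 : min 9 (9 + p - hi + d) = 9 + p' - p' := by omega
        have e2 : max (p - lo + d) 0 = p' - lo := by omega
        rw [e1, e2]
        exact ih p' lo p' (by omega) (le_refl _) (by omega)
      · have e1 : min 9 (9 + p - hi + d) = 9 + p' - hi := by omega
        have e2 : max (p - lo + d) 0 = p' - lo := by omega
        rw [e1, e2]
        exact ih p' lo hi (by omega) (by omega) h3

-- ===== VERDICT (by name: the statement is the Claim_ definition above) =====
theorem diffs_are_possible_spec : Claim_equal_diffs_are_possible := by
  intro diffs _
  unfold Spec_diffs_are_possible diffs_are_possible diffs_are_possible_alt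
  have := main_lemma diffs 0 0 0 (le_refl _) (le_refl _) (by norm_num)
  simpa using this
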